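-- pv_equiv track=rewrite | github.com/flaviuu9/sat-comparison2025 | cdcl.py | is_all_assigned
-- ===== SOURCE A (Python) =====
-- def is_all_assigned(clauses, assignment):
--     # collect all variables from the clauses
--     vars_in_formula = []
--     for clause in clauses:
--         for lit in clause:
--             var = abs(lit)
--             if var not in vars_in_formula:
--                 vars_in_formula.append(var)
--
--     for var in vars_in_formula:
--         if var not in assignment:
--             return False
--
--     return True
-- ===== SOURCE B (Python) =====
-- def is_all_assigned(clauses, assignment):
--     # single streaming pass: no intermediate variable table
--     for clause in clauses:
--         for lit in clause:
--             if abs(lit) not in assignment: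
--                 return False
--     return True
-- ===== Notes on version B (the rewrite author's own statement) =====
-- stated objective: faster
-- what changed: Drops A's quadratic dedup pass that builds a unique-variable list before checking; B checks each literal's variable against the assignment in one streaming pass over the clauses, with early exit.
import Mathlib
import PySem

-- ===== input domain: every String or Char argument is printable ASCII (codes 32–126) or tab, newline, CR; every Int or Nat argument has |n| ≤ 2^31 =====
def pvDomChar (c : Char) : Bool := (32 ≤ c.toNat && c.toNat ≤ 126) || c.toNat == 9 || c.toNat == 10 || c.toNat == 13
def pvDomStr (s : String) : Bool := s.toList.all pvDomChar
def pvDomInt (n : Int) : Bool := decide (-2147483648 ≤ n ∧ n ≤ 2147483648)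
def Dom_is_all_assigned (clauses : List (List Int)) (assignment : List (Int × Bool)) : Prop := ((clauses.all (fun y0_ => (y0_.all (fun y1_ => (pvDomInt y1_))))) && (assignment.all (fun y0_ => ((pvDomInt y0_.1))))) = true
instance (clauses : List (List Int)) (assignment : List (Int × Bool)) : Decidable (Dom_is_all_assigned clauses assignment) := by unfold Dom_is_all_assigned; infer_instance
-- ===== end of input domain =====

-- B replaces A's two-phase "build deduplicated variable list, then scan it" with one
-- streaming pass over the literals (early exit on the first unassigned variable);
-- same return value, the dedup table disappears.

-- ===== PORT A =====
-- vars_in_formula accumulation: nested loops with 'if var not in vars_in_formula: append'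
def pvCollectVars (clauses : List (List Int)) : List Int :=
  clauses.foldl
    (fun acc clause =>
      clause.foldl (fun acc2 lit => if acc2.contains |lit| then acc2 else acc2 ++ [|lit|]) acc)
    []

-- second loop: 'for var in vars_in_formula: if var not in assignment: return False'
def pvCheckVars (vars : List Int) (assignment : List (Int × Bool)) : Bool :=
  match vars with
  | [] => true
  | v :: rest => if assignment.any (fun p => p.1 == v) then pvCheckVars rest assignment else false

def is_all_assigned (clauses : List (List Int)) (assignment : List (Int × Bool)) : Bool :=
  pvCheckVars (pvCollectVars clauses) assignment

-- ===== PORT B =====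
def is_all_assigned_alt (clauses : List (List Int)) (assignment : List (Int × Bool)) : Bool :=
  clauses.all (fun clause => clause.all (fun lit => assignment.any (fun p => p.1 == |lit|)))

-- ===== PRECONDITION & SPEC =====
def Spec_is_all_assigned (clauses : List (List Int)) (assignment : List (Int × Bool)) (out : Bool) : Prop := out = is_all_assigned_alt clauses assignment
instance (clauses : List (List Int)) (assignment : List (Int × Bool)) (out : Bool) : Decidable (Spec_is_all_assigned clauses assignment out) := by unfold Spec_is_all_assigned; infer_instance

-- ===== CLAIM (what is proved, stated in full; the proofs are below) =====
def Claim_equal_is_all_assigned : Prop := ∀ (clauses : List (List Int)) (assignment : List (Int × Bool)), Dom_is_all_assigned clauses assignment → Spec_is_all_assigned clauses assignment (is_all_assigned clauses assignment)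

-- ===== LEMMAS AND PROOFS =====

-- the early-return scan is List.all of the membership test
theorem pvCheckVars_eq_all (vars : List Int) (assignment : List (Int × Bool)) :
    pvCheckVars vars assignment = vars.all (fun v => assignment.any (fun p => p.1 == v)) := by
  induction vars with
  | nil => rfl
  | cons v rest ih =>
    simp only [pvCheckVars, List.all_cons, ih]
    by_cases h : assignment.any (fun p => p.1 == v) = true <;> simp [h]

-- membership in the inner dedup fold
theorem mem_inner_fold (clause : List Int) (acc : List Int) (x : Int) :
    (x ∈ clause.foldl (fun acc2 lit => if acc2.contains |lit| then acc2 else acc2 ++ [|lit|]) acc)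
      ↔ x ∈ acc ∨ ∃ l ∈ clause, |l| = x := by
  induction clause generalizing acc with
  | nil => simp
  | cons l rest ih =>
    simp only [List.foldl_cons, ih]
    by_cases h : acc.contains |l| = true
    · simp only [h, List.mem_cons]
      rw [List.contains_iff_mem] at h
      constructor
      · rintro (hx | ⟨y, hy, rfl⟩)
        · exact Or.inl hx
        · exact Or.inr ⟨y, Or.inr hy, rfl⟩
      · rintro (hx | ⟨y, hy | hy, rfl⟩)
        · exact Or.inl hx
        · subst hy; exact Or.inl h
        · exact Or.inr ⟨y, hy, rfl⟩
    · simp only [h, if_neg, List.mem_append, List.mem_singleton, Bool.false_eq_true,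
        not_false_iff, List.mem_cons]
      aesop

-- membership in the collected variable list
theorem mem_pvCollectVars (clauses : List (List Int)) (x : Int) :
    x ∈ pvCollectVars clauses ↔ ∃ c ∈ clauses, ∃ l ∈ c, |l| = x := by
  unfold pvCollectVars
  suffices h : ∀ acc : List Int,
      (x ∈ clauses.foldl (fun acc clause =>
          clause.foldl (fun acc2 lit => if acc2.contains |lit| then acc2 else acc2 ++ [|lit|]) acc) acc)
        ↔ x ∈ acc ∨ ∃ c ∈ clauses, ∃ l ∈ c, |l| = x by
    simpa using h []
  induction clauses with
  | nil => simp
  | cons c rest ih =>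
    intro acc
    simp only [List.foldl_cons, ih, mem_inner_fold, List.mem_cons]
    constructor
    · rintro (⟨hx | ⟨l, hl, rfl⟩⟩ | ⟨d, hd, hl⟩)
      · exact Or.inl hx
      · exact Or.inr ⟨c, Or.inl rfl, l, hl, rfl⟩
      · exact Or.inr ⟨d, Or.inr hd, hl⟩
    · rintro (hx | ⟨d, hd | hd, hl⟩)
      · exact Or.inl (Or.inl hx)
      · subst hd; exact Or.inl (Or.inr hl)
      · exact Or.inr ⟨d, hd, hl⟩

-- ===== VERDICT (by name: the statement is the Claim_ definition above) =====
theorem is_all_assigned_spec : Claim_equal_is_all_assigned := by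
  intro clauses assignment _
  unfold Spec_is_all_assigned is_all_assigned is_all_assigned_alt
  rw [pvCheckVars_eq_all, Bool.eq_iff_iff]
  simp only [List.all_eq_true]
  constructor
  · intro h c hc l hl
    exact h |l| ((mem_pvCollectVars clauses |l|).2 ⟨c, hc, l, hl, rfl⟩)
  · intro h v hv
    obtain ⟨c, hc, l, hl, rfl⟩ := (mem_pvCollectVars clauses v).1 hv
    exact h c hc l hl
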